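-- pv_equiv track=rewrite | github.com/sinhaapurva25/interview-experiences | Cisco/Set-3/circularPrimes.py | countCircularPrimes
-- ===== SOURCE A (Python) =====
-- from math import sqrt
--
-- def isPrime(n):
--     if (n <= 1):
--         return False
--     for i in range(2, int(sqrt(n))+1):
--         if (n % i == 0):
--             return False
--     return True
--
-- def rotateStrings(string):
--     rotatedStrings = []
--     n = len(string)
--     temp = string + string
--     for i in range(n):
--         k = ''
--         for j in range(n):
--             k = k + temp[i+j]
--         rotatedStrings.append(k)
--     return rotatedStrings
--
-- def countCircularPrimes(number):
--     # Write your code here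
--     count = 0
--     for i in range(number+1):
--         num = str(i)
--         perms = rotateStrings(num)
--         no_of_cirular_primes = sum([1 for i in perms if isPrime(int(i))])
--         if no_of_cirular_primes == len(perms):
--             count += 1
--     return count
-- ===== SOURCE B (Python) =====
-- def countCircularPrimes(number):
--     if number < 0:
--         return 0
--     # pass 1: the integer values of every rotation of every candidate
--     rot_lists = []
--     for i in range(number + 1):
--         s = str(i)
--         rot_lists.append([int(s[r:] + s[:r]) for r in range(len(s))])
--     limit = max(v for vals in rot_lists for v in vals) + 1
--     # sieve-style precompute: every n < limit with a divisor k, 2 <= k <= sqrt(n), is some j*k below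
--     composites = set()
--     k = 2
--     while k * k < limit:
--         for j in range(k, limit // k + 1):
--             composites.add(j * k)
--         k += 1
--     # pass 2: O(1) primality lookups
--     count = 0
--     for vals in rot_lists:
--         if all(v >= 2 and v not in composites for v in vals):
--             count += 1
--     return count
-- ===== Notes on version B (the rewrite author's own statement) =====
-- stated objective: faster
-- what changed: B replaces the per-rotation trial division (O(sqrt r) per test) by one sieve-style precomputation of all composites below the largest rotation value, making each primality test an O(1) set lookup; rotations are built by slicing instead of char-by-char indexing into a doubled string.
import Mathlib
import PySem

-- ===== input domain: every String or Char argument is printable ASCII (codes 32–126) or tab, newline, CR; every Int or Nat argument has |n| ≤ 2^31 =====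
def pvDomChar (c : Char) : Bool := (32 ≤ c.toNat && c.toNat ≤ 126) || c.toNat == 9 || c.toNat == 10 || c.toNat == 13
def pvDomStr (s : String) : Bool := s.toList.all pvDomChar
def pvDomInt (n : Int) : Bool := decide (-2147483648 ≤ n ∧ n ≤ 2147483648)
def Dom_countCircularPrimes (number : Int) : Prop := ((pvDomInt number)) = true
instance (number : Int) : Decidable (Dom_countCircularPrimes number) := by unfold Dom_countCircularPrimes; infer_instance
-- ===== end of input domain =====

-- B replaces A's per-rotation trial division by one sieve-style precomputation of every composite
-- below the largest rotation value, so each primality test becomes a set lookup (measured faster).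

-- ===== PORT A =====
-- isPrime: trial division up to int(sqrt(n)) (math.sqrt rounds to the exact integer sqrt on this domain);
-- the early-return loop is the short-circuiting `all` over the same range.
def pvIsPrime (n : Int) : Bool :=
  if n ≤ 1 then false
  else (PySem.List.pyRange 2 ((Nat.sqrt n.toNat : Int) + 1) 1).all
         (fun i => !(PySem.Int.mod n i == 0))

-- rotateStrings: temp = string + string; k built char by char from temp[i+j]
-- (the index i+j is always in range, so the pyGetD default is never used).
def pvRotateStrings (s : List Char) : List (List Char) :=
  let n : Int := (s.length : Int)
  let temp := s ++ s
  (PySem.List.pyRange 0 n 1).foldl (fun acc i =>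
    acc ++ [(PySem.List.pyRange 0 n 1).foldl
              (fun k j => k ++ [PySem.List.pyGetD temp (i + j) ' ']) []]) []

-- int(k) on a rotation of str(i): always a nonempty digit string, so ofChars? is never none
-- and the .getD 0 default is never used.
def countCircularPrimes (number : Int) : Int :=
  (PySem.List.pyRange 0 (number + 1) 1).foldl (fun count i =>
    let num := PySem.Int.toChars i
    let perms := pvRotateStrings num
    let s := ((perms.filter (fun p => pvIsPrime ((PySem.Int.ofChars? p).getD 0))).map
                (fun _ => (1 : Int))).sum
    if s == (perms.length : Int) then count + 1 else count) 0

-- ===== PORT B =====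
-- [int(s[r:] + s[:r]) for r in range(len(s))]  (the parse is never none, as above)
def pvRotVals (i : Int) : List Int :=
  let s := PySem.Int.toChars i
  (PySem.List.pyRange 0 (s.length : Int) 1).map (fun r =>
    (PySem.Int.ofChars? (PySem.List.slice s (some r) none ++
                         PySem.List.slice s none (some r))).getD 0)

-- inner loop: for j in range(k, limit // k + 1): composites.add(j * k)
def pvMarkRow (limit k : Int) (acc : PySem.Set Int) : PySem.Set Int :=
  (PySem.List.pyRange k (PySem.Int.floordiv limit k + 1) 1).foldl
    (fun st j => PySem.Set.add st (j * k)) acc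

-- while k * k < limit: mark row k; k += 1
def pvSieve (limit k : Int) (acc : PySem.Set Int) : PySem.Set Int :=
  if h : k * k < limit then pvSieve limit (k + 1) (pvMarkRow limit k acc) else acc
termination_by (limit - k).toNat
decreasing_by
  have hk : k < limit := by nlinarith [mul_self_nonneg k]
  omega

-- max(...) of the flattened rotation values is never empty here (number ≥ 0 gives i = 0),
-- so its .getD 0 default is never used.
def countCircularPrimes_alt (number : Int) : Int :=
  if number < 0 then 0
  else
    let rotLists := (PySem.List.pyRange 0 (number + 1) 1).map pvRotVals
    let limit := ((PySem.List.max? (rotLists.flatMap id) id).getD 0) + 1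
    let composites := pvSieve limit 2 PySem.Set.empty
    rotLists.foldl (fun count vals =>
      if vals.all (fun v => decide (2 ≤ v) && !(PySem.Set.contains composites v))
      then count + 1 else count) 0

-- ===== PRECONDITION & SPEC =====
def Spec_countCircularPrimes (number : Int) (out : Int) : Prop := out = countCircularPrimes_alt number
instance (number : Int) (out : Int) : Decidable (Spec_countCircularPrimes number out) := by unfold Spec_countCircularPrimes; infer_instance

-- ===== CLAIM (what is proved, stated in full; the proofs are below) =====
def Claim_equal_countCircularPrimes : Prop := ∀ (number : Int), Dom_countCircularPrimes number → Spec_countCircularPrimes number (countCircularPrimes number)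

-- ===== LEMMAS AND PROOFS =====

-- The inner char-collecting loop of rotateStrings builds exactly drop a ++ take a.
lemma pvRot_inner (s : List Char) (a : Nat) (ha : a ≤ s.length) :
    (List.range s.length).map (fun j => (s ++ s).getD (a + j) ' ') =
      s.drop a ++ s.take a := by
  apply List.ext_getElem
  · simp; omega
  · intro m h1 h2
    simp only [List.getElem_map, List.getElem_range]
    have hm : m < s.length := by simpa using h1
    rw [List.getD_eq_getElem _ _ (by simp; omega)]
    by_cases hc : m < s.length - a
    · rw [List.getElem_append_left (by omega)]
      rw [List.getElem_append_left (by simpa using hc)]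
      simp [List.getElem_drop]
    · rw [List.getElem_append_right (by omega)]
      rw [List.getElem_append_right (by simp; omega)]
      simp only [List.getElem_take]
      congr 1
      simp
      omega

-- rotateStrings s = [drop a ++ take a  for a in range(len s)]
lemma pvRotateStrings_eq (s : List Char) :
    pvRotateStrings s = (List.range s.length).map (fun a => s.drop a ++ s.take a) := by
  unfold pvRotateStrings
  simp only [PySem.List.foldl_append_singleton_eq_map, List.nil_append,
    PySem.List.pyRange_zero_nat, List.map_map]
  apply List.map_congr_left
  intro a ha
  simp only [Function.comp_apply]
  rw [← pvRot_inner s a (le_of_lt (by simpa using ha))]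
  apply List.map_congr_left
  intro b hb
  show PySem.List.pyGetD (s ++ s) ((a:Int) + (b:Int)) ' ' = (s ++ s).getD (a + b) ' '
  have h : (a : Int) + (b : Int) = ((a + b : Nat) : Int) := by push_cast; ring
  rw [h, PySem.List.pyGetD_natCast]

-- B's rotation values are the parses of the same rotation strings.
lemma pvRotVals_eq (i : Int) :
    pvRotVals i = (List.range (PySem.Int.toChars i).length).map
      (fun a => ((PySem.Int.ofChars? ((PySem.Int.toChars i).drop a ++ (PySem.Int.toChars i).take a)).getD 0)) := by
  unfold pvRotVals
  simp only [PySem.List.pyRange_zero_nat, List.map_map]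
  apply List.map_congr_left
  intro a ha
  simp only [Function.comp_apply, PySem.List.slice_from_natCast, PySem.List.slice_to_natCast]

-- Sieve membership characterisation (for 2 ≤ k).
lemma mem_pvSieve (limit : Int) (k : Int) (acc : PySem.Set Int) (v : Int) (hk : 2 ≤ k) :
    v ∈ pvSieve limit k acc ↔
      v ∈ acc ∨ ∃ k' j : Int, k ≤ k' ∧ k' * k' < limit ∧ k' ≤ j ∧
        j ≤ PySem.Int.floordiv limit k' ∧ v = j * k' := by
  induction k, acc using pvSieve.induct limit with
  | case1 k acc h ih =>
    rw [pvSieve, dif_pos h]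
    rw [ih (by omega)]
    unfold pvMarkRow
    rw [PySem.Set.mem_foldl_add]
    constructor
    · rintro ((hv | ⟨j, hj, rfl⟩) | ⟨k', j, hk', hlt, hjk, hjf, rfl⟩)
      · exact Or.inl hv
      · rw [PySem.List.mem_pyRange_one] at hj
        exact Or.inr ⟨k, j, le_refl k, h, hj.1, by omega, rfl⟩
      · exact Or.inr ⟨k', j, by omega, hlt, hjk, hjf, rfl⟩
    · rintro (hv | ⟨k', j, hk', hlt, hjk, hjf, rfl⟩)
      · exact Or.inl (Or.inl hv)
      · rcases eq_or_lt_of_le hk' with heq | hlt2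
        · subst heq
          exact Or.inl (Or.inr ⟨j, by rw [PySem.List.mem_pyRange_one]; omega, rfl⟩)
        · exact Or.inr ⟨k', j, by omega, hlt, hjk, hjf, rfl⟩
  | case2 k acc h =>
    rw [pvSieve, dif_neg h]
    constructor
    · exact Or.inl
    · rintro (hv | ⟨k', j, hk', hlt, hjk, hjf, rfl⟩)
      · exact hv
      · exfalso
        have : k * k ≤ k' * k' := by nlinarith
        omega

-- A's trial division agrees with B's sieve lookup on every value below the sieve bound.
lemma pvIsPrime_eq_lookup (limit v : Int) (hv : v < limit) :
    pvIsPrime v =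
      (decide (2 ≤ v) && !(PySem.Set.contains (pvSieve limit 2 PySem.Set.empty) v)) := by
  by_cases h1 : v ≤ 1
  · simp [pvIsPrime, h1]
  · have h2 : 2 ≤ v := by omega
    have hv0 : 0 ≤ v := by omega
    rw [pvIsPrime, if_neg h1]
    have hd : decide (2 ≤ v) = true := by simp [h2]
    rw [hd, Bool.true_and]
    rw [Bool.eq_iff_iff]
    simp only [List.all_eq_true, Bool.not_eq_true', ← Bool.not_eq_true,
      PySem.Set.contains_iff]
    rw [mem_pvSieve limit 2 PySem.Set.empty v (le_refl 2)]
    have hempty : v ∉ (PySem.Set.empty : PySem.Set Int) := by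
      simp [PySem.Set.empty]
    constructor
    · -- no divisor up to sqrt → not marked
      intro hall hmem
      rcases hmem with hmem | ⟨k, j, hk2, hlt, hkj, hjf, rfl⟩
      · exact hempty hmem
      · have hk0 : 0 < k := by omega
        have hkk : k * k ≤ j * k := by nlinarith
        have e1 : ((k.toNat : Int)) = k := Int.toNat_of_nonneg (by omega)
        have e2 : (((j * k).toNat : Int)) = j * k := Int.toNat_of_nonneg (by omega)
        have h1' : k.toNat * k.toNat ≤ (j * k).toNat := by
          have hc : ((k.toNat * k.toNat : Nat) : Int) ≤ (((j * k).toNat : Nat) : Int) := by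
            push_cast [e1, e2]; exact hkk
          exact_mod_cast hc
        have hsq : k ≤ (Nat.sqrt (j * k).toNat : Int) := by
          have := Nat.le_sqrt.mpr h1'
          omega
        have hin : k ∈ PySem.List.pyRange 2 ((Nat.sqrt (j*k).toNat : Int) + 1) 1 := by
          rw [PySem.List.mem_pyRange_one]; omega
        have := hall k hin
        simp only [beq_iff_eq, PySem.Int.mod_eq_zero_iff_dvd] at this
        exact this (Dvd.intro_left j rfl)
    · -- not marked → no divisor up to sqrt
      intro hnmem d hd
      rw [PySem.List.mem_pyRange_one] at hd
      simp only [beq_iff_eq, PySem.Int.mod_eq_zero_iff_dvd]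
      intro hmod
      obtain ⟨c, rfl⟩ := hmod
      apply hnmem
      refine Or.inr ⟨d, c, hd.1, ?_, ?_, ?_, mul_comm d c⟩
      all_goals
        have hd0 : 0 < d := by omega
        have hds : d ≤ (Nat.sqrt (d * c).toNat : Int) := by omega
        have e1 : ((d.toNat : Int)) = d := Int.toNat_of_nonneg (by omega)
        have hdn : d.toNat ≤ Nat.sqrt (d * c).toNat := by omega
        have h1' : d.toNat * d.toNat ≤ (d * c).toNat := Nat.le_sqrt.mp hdn
        have hvnn : 0 ≤ d * c := by omega
        have e2 : (((d * c).toNat : Int)) = d * c := Int.toNat_of_nonneg hvnn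
        have hdd : d * d ≤ d * c := by
          have hc : ((d.toNat * d.toNat : Nat) : Int) ≤ (((d * c).toNat : Nat) : Int) := by
            exact_mod_cast h1'
          rw [e2] at hc; push_cast [e1] at hc; exact hc
      · nlinarith
      · exact le_of_mul_le_mul_left hdd hd0
      · rw [PySem.Int.le_floordiv_iff_mul_le (by omega)]
        nlinarith

-- Per candidate i: A's "number of prime rotations == number of rotations" test equals
-- B's short-circuit all-lookups test, given every rotation value of i is below the sieve bound.
lemma pvStepCond (L i : Int) (hbound : ∀ v ∈ pvRotVals i, v < L) :
    ((((pvRotateStrings (PySem.Int.toChars i)).filter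
        (fun p => pvIsPrime ((PySem.Int.ofChars? p).getD 0))).map
          (fun _ => (1 : Int))).sum == ((pvRotateStrings (PySem.Int.toChars i)).length : Int))
    = (pvRotVals i).all
        (fun v => decide (2 ≤ v) && !(PySem.Set.contains (pvSieve L 2 PySem.Set.empty) v)) := by
  rw [Bool.eq_iff_iff]
  rw [PySem.List.sum_map_const_int, beq_iff_eq, mul_one]
  rw [← List.countP_eq_length_filter]
  rw [show ((pvRotateStrings (PySem.Int.toChars i)).length : Int) =
        (((pvRotateStrings (PySem.Int.toChars i)).length : Nat) : Int) from rfl]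
  rw [Nat.cast_inj]
  rw [List.countP_eq_length]
  rw [List.all_eq_true]
  rw [pvRotateStrings_eq, pvRotVals_eq]
  simp only [List.forall_mem_map]
  apply forall_congr'
  intro a
  apply forall_congr'
  intro ha
  rw [pvIsPrime_eq_lookup L _ (hbound _ (by rw [pvRotVals_eq]; exact List.mem_map_of_mem ha))]

lemma pvMain (number : Int) : countCircularPrimes number = countCircularPrimes_alt number := by
  by_cases hneg : number < 0
  · rw [countCircularPrimes_alt, if_pos hneg, countCircularPrimes,
        PySem.List.pyRange_one_eq_nil (by omega)]
    rfl
  · rw [countCircularPrimes_alt, if_neg hneg, countCircularPrimes]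
    simp only [List.foldl_map]
    apply PySem.List.foldl_congr_mem
    intro acc i hi
    rw [pvStepCond]
    intro v hv
    have hmem : v ∈ ((PySem.List.pyRange 0 (number + 1) 1).map pvRotVals).flatMap id := by
      simp only [List.mem_flatMap, id]
      exact ⟨pvRotVals i, List.mem_map_of_mem hi, hv⟩
    rcases hmax : PySem.List.max? (((PySem.List.pyRange 0 (number + 1) 1).map pvRotVals).flatMap id) id with _ | m
    · rw [PySem.List.max?_eq_none_iff] at hmax
      rw [hmax] at hmem
      simp at hmem
    · have := PySem.List.max?_isMax hmax v hmem
      simp only [id] at this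
      simp only [Option.getD_some]
      omega

-- ===== VERDICT (by name: the statement is the Claim_ definition above) =====
theorem countCircularPrimes_spec : Claim_equal_countCircularPrimes := by
  intro number _
  unfold Spec_countCircularPrimes
  exact pvMain number
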